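-- pv_equiv track=rewrite | github.com/Prowo/MIDI-PHOR | comprehensive_llm_prompt.py | _categorize_programs
-- ===== SOURCE A (Python) =====
-- from typing import Dict, List, Any
--
-- def _categorize_programs(programs: List[int]) -> Dict[str, int]:
-- 	"""Categorize MIDI programs into families"""
-- 	families = {
-- 		'piano': 0,
-- 		'strings': 0,
-- 		'brass': 0,
-- 		'woodwinds': 0,
-- 		'percussion': 0,
-- 		'synth': 0
-- 	}
--
-- 	for prog in programs:
-- 		if prog in [0, 1, 2, 3, 4, 5, 6, 7]:  # Piano
-- 			families['piano'] += 1
-- 		elif prog in [48, 49, 50, 51, 52, 53, 54, 55]:  # Strings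
-- 			families['strings'] += 1
-- 		elif prog in [56, 57, 58, 59, 60, 61, 62, 63]:  # Brass
-- 			families['brass'] += 1
-- 		elif prog in [64, 65, 66, 67, 68, 69, 70, 71]:  # Woodwinds
-- 			families['woodwinds'] += 1
-- 		elif prog in [112, 113, 114, 115, 116, 117, 118, 119]:  # Percussion
-- 			families['percussion'] += 1
-- 		elif prog >= 80:  # Synth/Electronic
-- 			families['synth'] += 1
--
-- 	return families
-- ===== SOURCE B (Python) =====
-- def _categorize_programs(programs):
--     """Categorize MIDI programs into families (staged range-count passes)."""
--     def count_in(lo, hi):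
--         return sum(1 for p in programs if lo <= p < hi)
--     percussion = count_in(112, 120)
--     return {
--         'piano': count_in(0, 8),
--         'strings': count_in(48, 56),
--         'brass': count_in(56, 64),
--         'woodwinds': count_in(64, 72),
--         'percussion': percussion,
--         'synth': sum(1 for p in programs if p >= 80) - percussion,
--     }
-- ===== Notes on version B (the rewrite author's own statement) =====
-- stated objective: alternative
-- what changed: Replaces A's single pass that classifies each element through a chain of membership tests into a mutable counter dict by six independent range-counting passes (sum of a comparison per family), computing synth by subtraction (count of p>=80 minus the percussion count) instead of branch ordering.
import Mathlib
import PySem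

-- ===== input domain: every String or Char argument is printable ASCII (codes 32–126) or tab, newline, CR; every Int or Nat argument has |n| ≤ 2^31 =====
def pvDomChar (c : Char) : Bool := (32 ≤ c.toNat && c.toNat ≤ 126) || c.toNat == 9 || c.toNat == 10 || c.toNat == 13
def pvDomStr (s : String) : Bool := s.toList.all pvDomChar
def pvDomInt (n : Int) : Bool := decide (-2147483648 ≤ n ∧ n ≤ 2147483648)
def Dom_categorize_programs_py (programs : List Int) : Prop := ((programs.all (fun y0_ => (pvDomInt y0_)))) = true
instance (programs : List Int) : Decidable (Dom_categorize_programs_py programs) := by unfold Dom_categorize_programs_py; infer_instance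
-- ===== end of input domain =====

-- B replaces A's single classifying pass over a mutable counter dict by six independent
-- range-counting passes, computing synth by subtraction (count of p>=80 minus percussion).

-- ===== PORT A =====
def pvInitFamilies : PySem.Dict String Int :=
  PySem.Dict.ofList [("piano", 0), ("strings", 0), ("brass", 0),
                     ("woodwinds", 0), ("percussion", 0), ("synth", 0)]

def pvStepA (d : PySem.Dict String Int) (prog : Int) : PySem.Dict String Int :=
  if prog ∈ ([0, 1, 2, 3, 4, 5, 6, 7] : List Int) then
    d.modify "piano" 0 (· + 1)
  else if prog ∈ ([48, 49, 50, 51, 52, 53, 54, 55] : List Int) then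
    d.modify "strings" 0 (· + 1)
  else if prog ∈ ([56, 57, 58, 59, 60, 61, 62, 63] : List Int) then
    d.modify "brass" 0 (· + 1)
  else if prog ∈ ([64, 65, 66, 67, 68, 69, 70, 71] : List Int) then
    d.modify "woodwinds" 0 (· + 1)
  else if prog ∈ ([112, 113, 114, 115, 116, 117, 118, 119] : List Int) then
    d.modify "percussion" 0 (· + 1)
  else if prog ≥ 80 then
    d.modify "synth" 0 (· + 1)
  else d

def categorize_programs_py (programs : List Int) : List (String × Int) :=
  (programs.foldl pvStepA pvInitFamilies).items

-- ===== PORT B =====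
-- sum(1 for p in programs if lo <= p < hi)
def pvCountIn (programs : List Int) (lo hi : Int) : Int :=
  programs.foldl (fun acc p => if lo ≤ p ∧ p < hi then acc + 1 else acc) 0

def categorize_programs_py_alt (programs : List Int) : List (String × Int) :=
  let percussion := pvCountIn programs 112 120
  [("piano", pvCountIn programs 0 8),
   ("strings", pvCountIn programs 48 56),
   ("brass", pvCountIn programs 56 64),
   ("woodwinds", pvCountIn programs 64 72),
   ("percussion", percussion),
   ("synth", programs.foldl (fun acc p => if 80 ≤ p then acc + 1 else acc) 0 - percussion)]

-- ===== PRECONDITION & SPEC =====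
def Spec_categorize_programs_py (programs : List Int) (out : List (String × Int)) : Prop := out = categorize_programs_py_alt programs
instance (programs : List Int) (out : List (String × Int)) : Decidable (Spec_categorize_programs_py programs out) := by unfold Spec_categorize_programs_py; infer_instance

-- ===== CLAIM (what is proved, stated in full; the proofs are below) =====
def Claim_equal_categorize_programs_py : Prop := ∀ (programs : List Int), Dom_categorize_programs_py programs → Spec_categorize_programs_py programs (categorize_programs_py programs)

-- ===== LEMMAS AND PROOFS =====

-- count of synth hits in A's branch order (proof helper only)
def pvCountSynth (programs : List Int) : Int :=
  programs.foldl (fun acc p => if 80 ≤ p ∧ ¬(112 ≤ p ∧ p < 120) then acc + 1 else acc) 0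

def pvCountGE80 (programs : List Int) : Int :=
  programs.foldl (fun acc p => if 80 ≤ p then acc + 1 else acc) 0

lemma pv_foldl_count_shift (c : Int → Prop) [DecidablePred c] (ps : List Int) (a : Int) :
    ps.foldl (fun acc p => if c p then acc + 1 else acc) a
      = a + ps.foldl (fun acc p => if c p then acc + 1 else acc) 0 := by
  induction ps generalizing a with
  | nil => simp
  | cons q qs ih =>
    simp only [List.foldl_cons]
    rw [ih, ih (if c q then (0:Int) + 1 else 0)]
    split <;> omega

lemma pvCountIn_cons (q : Int) (qs : List Int) (lo hi : Int) :
    pvCountIn (q :: qs) lo hi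
      = (if lo ≤ q ∧ q < hi then 1 else 0) + pvCountIn qs lo hi := by
  unfold pvCountIn
  simp only [List.foldl_cons]
  rw [pv_foldl_count_shift (fun p => lo ≤ p ∧ p < hi)]
  split <;> omega

lemma pvCountSynth_cons (q : Int) (qs : List Int) :
    pvCountSynth (q :: qs)
      = (if 80 ≤ q ∧ ¬(112 ≤ q ∧ q < 120) then 1 else 0) + pvCountSynth qs := by
  unfold pvCountSynth
  simp only [List.foldl_cons]
  rw [pv_foldl_count_shift (fun p => 80 ≤ p ∧ ¬(112 ≤ p ∧ p < 120))]
  split <;> omega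

lemma pvCountGE80_cons (q : Int) (qs : List Int) :
    pvCountGE80 (q :: qs) = (if 80 ≤ q then 1 else 0) + pvCountGE80 qs := by
  unfold pvCountGE80
  simp only [List.foldl_cons]
  rw [pv_foldl_count_shift (fun p => 80 ≤ p)]
  split <;> omega

lemma pvSynth_split (programs : List Int) :
    pvCountGE80 programs = pvCountSynth programs + pvCountIn programs 112 120 := by
  induction programs with
  | nil => simp [pvCountGE80, pvCountSynth, pvCountIn]
  | cons q qs ih =>
    rw [pvCountGE80_cons, pvCountSynth_cons, pvCountIn_cons, ih]
    split_ifs <;> omega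

set_option maxHeartbeats 2000000 in
lemma pvStepA_mk (q p s b w pc sy : Int) :
    pvStepA (PySem.Dict.mk [("piano", p), ("strings", s), ("brass", b),
                            ("woodwinds", w), ("percussion", pc), ("synth", sy)]) q
    = PySem.Dict.mk
        [("piano", p + if 0 ≤ q ∧ q < 8 then 1 else 0),
         ("strings", s + if 48 ≤ q ∧ q < 56 then 1 else 0),
         ("brass", b + if 56 ≤ q ∧ q < 64 then 1 else 0),
         ("woodwinds", w + if 64 ≤ q ∧ q < 72 then 1 else 0),
         ("percussion", pc + if 112 ≤ q ∧ q < 120 then 1 else 0),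
         ("synth", sy + if 80 ≤ q ∧ ¬(112 ≤ q ∧ q < 120) then 1 else 0)] := by
  unfold pvStepA
  simp only [List.mem_cons, List.not_mem_nil, or_false]
  by_cases h1 : q = 0 ∨ q = 1 ∨ q = 2 ∨ q = 3 ∨ q = 4 ∨ q = 5 ∨ q = 6 ∨ q = 7
  · rw [if_pos h1, if_pos (show 0 ≤ q ∧ q < 8 by omega),
       if_neg (show ¬(48 ≤ q ∧ q < 56) by omega), if_neg (show ¬(56 ≤ q ∧ q < 64) by omega),
       if_neg (show ¬(64 ≤ q ∧ q < 72) by omega), if_neg (show ¬(112 ≤ q ∧ q < 120) by omega),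
       if_neg (show ¬(80 ≤ q ∧ ¬(112 ≤ q ∧ q < 120)) by omega)]
    simp [PySem.Dict.modify, PySem.Dict.insert, PySem.Dict.getD, PySem.Dict.get?, PySem.Dict.contains]
  rw [if_neg h1, if_neg (show ¬(0 ≤ q ∧ q < 8) by omega)]
  by_cases h2 : q = 48 ∨ q = 49 ∨ q = 50 ∨ q = 51 ∨ q = 52 ∨ q = 53 ∨ q = 54 ∨ q = 55
  · rw [if_pos h2, if_pos (show 48 ≤ q ∧ q < 56 by omega),
       if_neg (show ¬(56 ≤ q ∧ q < 64) by omega), if_neg (show ¬(64 ≤ q ∧ q < 72) by omega),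
       if_neg (show ¬(112 ≤ q ∧ q < 120) by omega),
       if_neg (show ¬(80 ≤ q ∧ ¬(112 ≤ q ∧ q < 120)) by omega)]
    simp [PySem.Dict.modify, PySem.Dict.insert, PySem.Dict.getD, PySem.Dict.get?, PySem.Dict.contains]
  rw [if_neg h2, if_neg (show ¬(48 ≤ q ∧ q < 56) by omega)]
  by_cases h3 : q = 56 ∨ q = 57 ∨ q = 58 ∨ q = 59 ∨ q = 60 ∨ q = 61 ∨ q = 62 ∨ q = 63
  · rw [if_pos h3, if_pos (show 56 ≤ q ∧ q < 64 by omega),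
       if_neg (show ¬(64 ≤ q ∧ q < 72) by omega), if_neg (show ¬(112 ≤ q ∧ q < 120) by omega),
       if_neg (show ¬(80 ≤ q ∧ ¬(112 ≤ q ∧ q < 120)) by omega)]
    simp [PySem.Dict.modify, PySem.Dict.insert, PySem.Dict.getD, PySem.Dict.get?, PySem.Dict.contains]
  rw [if_neg h3, if_neg (show ¬(56 ≤ q ∧ q < 64) by omega)]
  by_cases h4 : q = 64 ∨ q = 65 ∨ q = 66 ∨ q = 67 ∨ q = 68 ∨ q = 69 ∨ q = 70 ∨ q = 71
  · rw [if_pos h4, if_pos (show 64 ≤ q ∧ q < 72 by omega),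
       if_neg (show ¬(112 ≤ q ∧ q < 120) by omega),
       if_neg (show ¬(80 ≤ q ∧ ¬(112 ≤ q ∧ q < 120)) by omega)]
    simp [PySem.Dict.modify, PySem.Dict.insert, PySem.Dict.getD, PySem.Dict.get?, PySem.Dict.contains]
  rw [if_neg h4, if_neg (show ¬(64 ≤ q ∧ q < 72) by omega)]
  by_cases h5 : q = 112 ∨ q = 113 ∨ q = 114 ∨ q = 115 ∨ q = 116 ∨ q = 117 ∨ q = 118 ∨ q = 119
  · rw [if_pos h5, if_pos (show 112 ≤ q ∧ q < 120 by omega),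
       if_neg (show ¬(80 ≤ q ∧ ¬(112 ≤ q ∧ q < 120)) by omega)]
    simp [PySem.Dict.modify, PySem.Dict.insert, PySem.Dict.getD, PySem.Dict.get?, PySem.Dict.contains]
  rw [if_neg h5, if_neg (show ¬(112 ≤ q ∧ q < 120) by omega)]
  by_cases h6 : q ≥ 80
  · rw [if_pos h6, if_pos (show 80 ≤ q ∧ ¬(112 ≤ q ∧ q < 120) by omega)]
    simp [PySem.Dict.modify, PySem.Dict.insert, PySem.Dict.getD, PySem.Dict.get?, PySem.Dict.contains]
  rw [if_neg h6, if_neg (show ¬(80 ≤ q ∧ ¬(112 ≤ q ∧ q < 120)) by omega)]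
  simp

lemma pv_foldA (programs : List Int) (p s b w pc sy : Int) :
    programs.foldl pvStepA
      (PySem.Dict.mk [("piano", p), ("strings", s), ("brass", b),
                      ("woodwinds", w), ("percussion", pc), ("synth", sy)])
    = PySem.Dict.mk
        [("piano", p + pvCountIn programs 0 8),
         ("strings", s + pvCountIn programs 48 56),
         ("brass", b + pvCountIn programs 56 64),
         ("woodwinds", w + pvCountIn programs 64 72),
         ("percussion", pc + pvCountIn programs 112 120),
         ("synth", sy + pvCountSynth programs)] := by
  induction programs generalizing p s b w pc sy with
  | nil => simp [pvCountIn, pvCountSynth]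
  | cons q qs ih =>
    rw [List.foldl_cons, pvStepA_mk, ih]
    simp only [pvCountIn_cons, pvCountSynth_cons, PySem.Dict.mk.injEq, List.cons.injEq,
      Prod.mk.injEq, and_true, true_and]
    split_ifs <;> refine ⟨?_, ?_, ?_, ?_, ?_, ?_⟩ <;> omega

-- ===== VERDICT (by name: the statement is the Claim_ definition above) =====
theorem categorize_programs_py_spec : Claim_equal_categorize_programs_py := by
  intro programs _
  unfold Spec_categorize_programs_py categorize_programs_py categorize_programs_py_alt
  have hinit : pvInitFamilies
      = PySem.Dict.mk [("piano", 0), ("strings", 0), ("brass", 0),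
                       ("woodwinds", 0), ("percussion", 0), ("synth", 0)] := by decide
  rw [hinit, pv_foldA]
  have hs : programs.foldl (fun acc p => if 80 ≤ p then acc + 1 else acc) 0
      = pvCountSynth programs + pvCountIn programs 112 120 := pvSynth_split programs
  simp [hs]
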